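-- pv_equiv track=rewrite | github.com/drussell23/JARVIS-AI | backend/vision/handlers/terminal_command_intelligence.py | _extract_command_output
-- ===== SOURCE A (Python) =====
-- from typing import Dict, Any, List, Optional, Tuple
--
-- def _extract_command_output(lines: List[str]) -> Optional[str]:
--     """Extract command output (text after last prompt)."""
--     # Find last prompt line
--     last_prompt_idx = -1
--     for i in range(len(lines) - 1, -1, -1):
--         if any(p in lines[i] for p in ['$', '%', '#', '>>>', '>']):
--             last_prompt_idx = i
--             break
--
--     if last_prompt_idx >= 0 and last_prompt_idx < len(lines) - 1:
--         output_lines = lines[last_prompt_idx + 1:]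
--         return '\n'.join(output_lines).strip()
--
--     return None
-- ===== SOURCE B (Python) =====
-- from typing import List, Optional
--
-- def _extract_command_output(lines: List[str]) -> Optional[str]:
--     """Extract command output (text after last prompt) in one forward pass."""
--     buffer = None
--     for line in lines:
--         if any(p in line for p in ('$', '%', '#', '>>>', '>')):
--             buffer = []
--         elif buffer is not None:
--             buffer.append(line)
--     if not buffer:
--         return None
--     return '\n'.join(buffer).strip()
-- ===== Notes on version B (the rewrite author's own statement) =====
-- stated objective: alternative
-- what changed: Replaces the backward index scan plus slice with a single forward pass that keeps a running post-prompt buffer, reset at every prompt line.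
import Mathlib
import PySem

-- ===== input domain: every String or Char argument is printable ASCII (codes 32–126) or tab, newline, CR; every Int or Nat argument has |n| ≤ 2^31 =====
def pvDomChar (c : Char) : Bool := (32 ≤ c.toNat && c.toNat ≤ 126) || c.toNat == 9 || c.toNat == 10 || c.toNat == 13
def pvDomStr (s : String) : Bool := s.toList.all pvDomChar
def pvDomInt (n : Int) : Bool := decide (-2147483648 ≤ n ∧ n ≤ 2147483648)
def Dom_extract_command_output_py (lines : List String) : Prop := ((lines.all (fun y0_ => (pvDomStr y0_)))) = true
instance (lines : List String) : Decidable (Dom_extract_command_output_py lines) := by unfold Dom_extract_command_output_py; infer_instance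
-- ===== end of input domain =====

-- B replaces A's backward index scan + slice by one forward pass keeping a running
-- post-prompt buffer that resets at each prompt line (alternative decomposition, same cost).

-- ===== PORT A =====
-- any(p in line for p in ['$', '%', '#', '>>>', '>'])
def pvIsPrompt (line : String) : Bool :=
  PySem.Str.isIn "$" line || PySem.Str.isIn "%" line || PySem.Str.isIn "#" line ||
  PySem.Str.isIn ">>>" line || PySem.Str.isIn ">" line

-- the backward 'for i in range(len(lines)-1, -1, -1)' loop with break: scans
-- indices k-1, k-2, …, 0; lines.getD k "" is lines[i] (the index is in range by construction)
def pvScanBack (lines : List String) : Nat → Int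
  | 0 => -1
  | k + 1 => if pvIsPrompt (lines.getD k "") then (k : Int) else pvScanBack lines k

def extract_command_output_py (lines : List String) : Option String :=
  let last_prompt_idx : Int := pvScanBack lines lines.length
  if 0 ≤ last_prompt_idx ∧ last_prompt_idx < (lines.length : Int) - 1 then
    some (PySem.Str.strip (PySem.Str.join "\n"
      (PySem.List.slice lines (some (last_prompt_idx + 1)) none)))
  else
    none

-- ===== PORT B =====
-- loop body: reset the buffer at a prompt line, otherwise append when a prompt was seen
def pvStepB (buf : Option (List String)) (line : String) : Option (List String) :=
  if pvIsPrompt line then some []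
  else match buf with
       | none => none
       | some b => some (b ++ [line])

def extract_command_output_py_alt (lines : List String) : Option String :=
  match lines.foldl pvStepB none with
  | none => none            -- 'if not buffer: return None'
  | some [] => none
  | some b => some (PySem.Str.strip (PySem.Str.join "\n" b))

-- ===== PRECONDITION & SPEC =====
def Spec_extract_command_output_py (lines : List String) (out : Option String) : Prop := out = extract_command_output_py_alt lines
instance (lines : List String) (out : Option String) : Decidable (Spec_extract_command_output_py lines out) := by unfold Spec_extract_command_output_py; infer_instance

-- ===== CLAIM (what is proved, stated in full; the proofs are below) =====
def Claim_equal_extract_command_output_py : Prop := ∀ (lines : List String), Dom_extract_command_output_py lines → Spec_extract_command_output_py lines (extract_command_output_py lines)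

-- ===== LEMMAS AND PROOFS =====

-- the backward scan never looks at indices ≥ k, so a snoc does not change it
theorem pvScanBack_append (l : List String) (x : String) (k : Nat) (hk : k ≤ l.length) :
    pvScanBack (l ++ [x]) k = pvScanBack l k := by
  induction k with
  | zero => rfl
  | succ k ih =>
    have hlt : k < l.length := by omega
    simp [pvScanBack, List.getElem?_append_left hlt, ih (by omega)]

-- joint characterisation of A's scan and B's fold
theorem pvJoint (l : List String) :
    (pvScanBack l l.length = -1 ∧ l.foldl pvStepB none = none) ∨
    (∃ k : Nat, k < l.length ∧ pvScanBack l l.length = (k : Int) ∧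
      l.foldl pvStepB none = some (l.drop (k + 1))) := by
  induction l using List.reverseRecOn with
  | nil => exact Or.inl ⟨rfl, rfl⟩
  | append_singleton l x ih =>
    have hlen : (l ++ [x]).length = l.length + 1 := by simp
    have hfold : (l ++ [x]).foldl pvStepB none = pvStepB (l.foldl pvStepB none) x := by
      simp [List.foldl_append]
    by_cases hp : pvIsPrompt x
    · refine Or.inr ⟨l.length, by simp, ?_, ?_⟩
      · rw [hlen]; simp [pvScanBack, hp]
      · rw [hfold]; simp [pvStepB, hp]
    · have hscan : pvScanBack (l ++ [x]) (l.length + 1) = pvScanBack l l.length := by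
        simp [pvScanBack, hp, pvScanBack_append l x l.length (le_refl _)]
      rcases ih with ⟨h1, h2⟩ | ⟨k, hk, h1, h2⟩
      · exact Or.inl ⟨by rw [hlen, hscan, h1], by rw [hfold, h2]; simp [pvStepB, hp]⟩
      · refine Or.inr ⟨k, by simp; omega, by rw [hlen, hscan, h1], ?_⟩
        rw [hfold, h2]
        have : (l ++ [x]).drop (k + 1) = l.drop (k + 1) ++ [x] :=
          List.drop_append_of_le_length (by omega)
        simp [pvStepB, hp, this]

-- A's slice lines[idx+1:] is List.drop (k+1) when idx = k ≥ 0
theorem pvSlice_drop (l : List String) (k : Nat) :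
    PySem.List.slice l (some ((k : Int) + 1)) none = l.drop (k + 1) := by
  have : ((k : Int) + 1) = ((k + 1 : Nat) : Int) := by push_cast; ring
  rw [this, PySem.List.slice_from_natCast]

-- ===== VERDICT (by name: the statement is the Claim_ definition above) =====
theorem extract_command_output_py_spec : Claim_equal_extract_command_output_py := by
  intro lines _
  unfold Spec_extract_command_output_py extract_command_output_py extract_command_output_py_alt
  rcases pvJoint lines with ⟨h1, h2⟩ | ⟨k, hk, h1, h2⟩ <;> dsimp only
  · rw [h1, h2]; norm_num
  · rw [h1, h2, pvSlice_drop]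
    by_cases hlast : k + 1 < lines.length
    · have hcond : (0 ≤ (k : Int) ∧ (k : Int) < (lines.length : Int) - 1) := by
        constructor <;> [positivity; (push_cast; omega)]
      have hne : lines.drop (k + 1) ≠ [] := by
        intro h
        have := List.drop_eq_nil_iff.mp h
        omega
      rw [if_pos hcond]
      cases hd : lines.drop (k + 1) with
      | nil => exact absurd hd hne
      | cons a t => rfl
    · have hnil : lines.drop (k + 1) = [] := List.drop_eq_nil_iff.mpr (by omega)
      have hcond : ¬ (0 ≤ (k : Int) ∧ (k : Int) < (lines.length : Int) - 1) := by
        omega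
      rw [if_neg hcond, hnil]
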